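-- pv_equiv track=rewrite | github.com/AlphaYuan/U-LFormer | code/datasets/dataset.py | find_last_indices_of_continuous
-- ===== SOURCE A (Python) =====
-- def find_last_indices_of_continuous(arr,num):
--     last_indices = []
--     continuous = False  # 用于跟踪当前是否在连续的2的片段中
--     for i in range(len(arr)):
--         if arr[i] == num:
--             if i == len(arr)-1:
--                 last_indices.append(i)  # 添加连续片段最后一个2的索引
--             if not continuous:  # 如果之前不是连续的2的片段
--                 continuous = True
--                 start_index = i  # 记录连续片段的起始索引
--             else:
--                 if i+1 < len(arr) and arr[i+1] != num:  # 如果下一个元素不是2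
--                     continuous = False  # 标记连续片段结束
--                     last_indices.append(i)  # 添加连续片段最后一个2的索引
--         else:
--             if continuous:  # 如果之前是连续的2的片段
--                 continuous = False  # 标记连续片段结束
--                 last_indices.append(i-1)  # 添加连续片段最后一个2的索引
--
--     return last_indices
-- ===== SOURCE B (Python) =====
-- def find_last_indices_of_continuous(arr, num):
--     n = len(arr)
--     return [i for i in range(n) if arr[i] == num and (i == n - 1 or arr[i + 1] != num)]
-- ===== Notes on version B (the rewrite author's own statement) =====
-- stated objective: simpler
-- what changed: Replaced A's state-machine loop (a 'continuous' flag plus a dead 'start_index') by a stateless one-pass comprehension that keeps index i exactly when arr[i]==num and (i is last or arr[i+1]!=num).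
import Mathlib
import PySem

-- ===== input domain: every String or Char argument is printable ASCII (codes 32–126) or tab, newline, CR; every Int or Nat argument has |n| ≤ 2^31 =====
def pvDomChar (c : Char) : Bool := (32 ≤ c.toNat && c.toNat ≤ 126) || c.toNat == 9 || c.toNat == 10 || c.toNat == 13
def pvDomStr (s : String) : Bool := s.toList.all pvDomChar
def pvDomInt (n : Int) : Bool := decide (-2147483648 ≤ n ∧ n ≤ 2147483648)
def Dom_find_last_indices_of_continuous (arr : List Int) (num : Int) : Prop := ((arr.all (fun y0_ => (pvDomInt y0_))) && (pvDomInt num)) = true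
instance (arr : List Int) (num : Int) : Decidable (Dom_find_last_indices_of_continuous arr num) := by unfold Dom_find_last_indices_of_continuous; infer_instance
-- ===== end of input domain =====

-- B replaces A's continuous-flag state machine by a stateless boundary test per index (same O(n) pass, no state).

-- ===== PORT A =====
-- loop body of A, transcribed branch for branch; state = (last_indices, continuous, start_index)

def pvStepA (arr : List Int) (num : Int) (n : Int) (s : List Int × Bool × Int) (i : Int) : List Int × Bool × Int :=
  let last_indices := s.1
  let continuous := s.2.1
  let start_index := s.2.2
  if PySem.List.pyGetD arr i 0 = num then
    let last_indices := if i = n - 1 then last_indices ++ [i] else last_indices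
    if !continuous then
      (last_indices, true, i)
    else
      if i + 1 < n ∧ PySem.List.pyGetD arr (i + 1) 0 ≠ num then
        (last_indices ++ [i], false, start_index)
      else
        (last_indices, continuous, start_index)
  else
    if continuous then
      (last_indices ++ [i - 1], false, start_index)
    else
      (last_indices, continuous, start_index)

def find_last_indices_of_continuous (arr : List Int) (num : Int) : List Int :=
  ((PySem.List.pyRange 0 (arr.length : Int) 1).foldl
      (pvStepA arr num (arr.length : Int)) ([], false, 0)).1

-- ===== PORT B =====
-- the stateless membership test of B's comprehension
def pvKeep (arr : List Int) (num : Int) (n : Int) (i : Int) : Bool :=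
  PySem.List.pyGetD arr i 0 == num && (i == n - 1 || PySem.List.pyGetD arr (i + 1) 0 != num)


def find_last_indices_of_continuous_alt (arr : List Int) (num : Int) : List Int :=
  (PySem.List.pyRange 0 (arr.length : Int) 1).filter (pvKeep arr num (arr.length : Int))

-- ===== PRECONDITION & SPEC =====
def Spec_find_last_indices_of_continuous (arr : List Int) (num : Int) (out : List Int) : Prop := out = find_last_indices_of_continuous_alt arr num
instance (arr : List Int) (num : Int) (out : List Int) : Decidable (Spec_find_last_indices_of_continuous arr num out) := by unfold Spec_find_last_indices_of_continuous; infer_instance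

-- ===== CLAIM (what is proved, stated in full; the proofs are below) =====
def Claim_equal_find_last_indices_of_continuous : Prop := ∀ (arr : List Int) (num : Int), Dom_find_last_indices_of_continuous arr num → Spec_find_last_indices_of_continuous arr num (find_last_indices_of_continuous arr num)

-- ===== LEMMAS AND PROOFS =====

lemma pvKeep_eval (arr : List Int) (num : Int) (j : Nat) :
    pvKeep arr num (arr.length : Int) (j : Int)
      = (decide (arr.getD j 0 = num) &&
         (decide (j + 1 = arr.length) || !decide (arr.getD (j + 1) 0 = num))) := by
  have e1 : ((j : Int) + 1) = ((j + 1 : Nat) : Int) := by push_cast; ring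
  have e2 : ((j : Int) = (arr.length : Int) - 1) ↔ (j + 1 = arr.length) := by omega
  have eb : (((j : Int)) == (arr.length : Int) - 1) = decide (j + 1 = arr.length) := by
    apply Bool.eq_iff_iff.mpr; simp [e2]
  simp only [pvKeep, e1, PySem.List.pyGetD_natCast, eb, bne]
  rfl

lemma pvStepA_eval (arr : List Int) (num : Int) (j : Nat) (acc : List Int) (cont : Bool) (si : Int) :
    pvStepA arr num (arr.length : Int) (acc, cont, si) (j : Int)
      = if arr.getD j 0 = num then
          (if cont then
            (if j + 1 < arr.length ∧ arr.getD (j + 1) 0 ≠ num then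
              ((if j + 1 = arr.length then acc ++ [(j : Int)] else acc) ++ [(j : Int)], false, si)
            else
              ((if j + 1 = arr.length then acc ++ [(j : Int)] else acc), cont, si))
          else
            ((if j + 1 = arr.length then acc ++ [(j : Int)] else acc), true, (j : Int)))
        else
          (if cont then (acc ++ [(j : Int) - 1], false, si) else (acc, cont, si)) := by
  have e1 : ((j : Int) + 1) = ((j + 1 : Nat) : Int) := by push_cast; ring
  have e2 : ((j : Int) = (arr.length : Int) - 1) ↔ (j + 1 = arr.length) := by omega
  have e3 : (((j + 1 : Nat) : Int) < (arr.length : Int)) ↔ (j + 1 < arr.length) := by omega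
  simp only [pvStepA, e1, PySem.List.pyGetD_natCast]
  simp only [e2, e3]
  cases cont <;> simp only [Bool.not_false, Bool.not_true, if_true] <;> rfl

lemma pv_fold_inv (arr : List Int) (num : Int) :
    ∀ (m k : Nat), arr.length - k = m →
      (∀ (acc : List Int) (si : Int),
        ((PySem.List.pyRange (k : Int) (arr.length : Int) 1).foldl
            (pvStepA arr num (arr.length : Int)) (acc, false, si)).1
          = acc ++ (PySem.List.pyRange (k : Int) (arr.length : Int) 1).filter
              (pvKeep arr num (arr.length : Int)))
      ∧ (∀ (acc : List Int) (si : Int), 1 ≤ k → k < arr.length → arr.getD (k - 1) 0 = num →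
        ((PySem.List.pyRange (k : Int) (arr.length : Int) 1).foldl
            (pvStepA arr num (arr.length : Int)) (acc, true, si)).1
          = acc ++ (PySem.List.pyRange ((k : Int) - 1) (arr.length : Int) 1).filter
              (pvKeep arr num (arr.length : Int))) := by
  intro m
  induction m with
  | zero =>
    intro k hk
    have hnil : PySem.List.pyRange (k : Int) (arr.length : Int) 1 = [] :=
      PySem.List.pyRange_one_eq_nil (by omega)
    constructor
    · intro acc si; simp [hnil]
    · intro acc si h1 h2 h3; omega
  | succ m ih =>
    intro k hk
    have hklt : k < arr.length := by omega
    have hcons : PySem.List.pyRange (k : Int) (arr.length : Int) 1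
        = (k : Int) :: PySem.List.pyRange ((k : Int) + 1) (arr.length : Int) 1 :=
      PySem.List.pyRange_one_cons (by exact_mod_cast hklt)
    have hk1c : ((k : Int) + 1) = ((k + 1 : Nat) : Int) := by push_cast; ring
    have ekm : ((k : Int) - 1) + 1 = (k : Int) := by omega
    obtain ⟨ih1, ih2⟩ := ih (k + 1) (by omega)
    have egk : arr[k]?.getD 0 = arr[k] := by simp [List.getElem?_eq_getElem hklt]
    by_cases hk0 : arr[k]?.getD 0 = num
    all_goals rw [egk] at hk0
    · by_cases hlast : k + 1 = arr.length
      · -- k is the last index of arr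
        have hrest : PySem.List.pyRange ((k : Int) + 1) (arr.length : Int) 1 = [] :=
          PySem.List.pyRange_one_eq_nil (by omega)
        have hstep : ∀ (acc : List Int) (si : Int) (cont : Bool),
            pvStepA arr num (arr.length : Int) (acc, cont, si) (k : Int)
              = (acc ++ [(k : Int)], true, if cont then si else (k : Int)) := by
          intro acc si cont
          rw [pvStepA_eval]
          cases cont <;> simp [egk, hk0, hlast]
        have hPk : pvKeep arr num (arr.length : Int) (k : Int) = true := by
          rw [pvKeep_eval]; simp [egk, hk0, hlast]
        constructor
        · intro acc si
          rw [hcons]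
          simp only [List.foldl_cons, hstep, hrest, List.foldl_nil, List.filter_cons, hPk]
          simp
        · intro acc si h1 h2 h3
          have h3' : arr[k - 1]?.getD 0 = num := by simpa using h3
          have egm : arr[k - 1]?.getD 0 = arr[k - 1] := by
            simp [List.getElem?_eq_getElem (show k - 1 < arr.length by omega)]
          rw [egm] at h3'
          have hcons' : PySem.List.pyRange ((k : Int) - 1) (arr.length : Int) 1
              = ((k : Int) - 1) :: PySem.List.pyRange (k : Int) (arr.length : Int) 1 := by
            have := PySem.List.pyRange_one_cons (a := (k : Int) - 1)
              (b := (arr.length : Int)) (by omega)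
            simpa [ekm] using this
          have hPkm : pvKeep arr num (arr.length : Int) ((k : Int) - 1) = false := by
            have e : ((k : Int) - 1) = ((k - 1 : Nat) : Int) := by omega
            have e' : k - 1 + 1 = k := by omega
            rw [e, pvKeep_eval]
            simp [egm, egk, e', h3', hk0]
            omega
          rw [hcons']; rw [List.filter_cons, hPkm]; simp only [Bool.false_eq_true, if_false]; rw [hcons]
          simp only [List.foldl_cons, hstep, hrest, List.foldl_nil, List.filter_cons, hPk]
          simp
      · -- k is not the last index of arr
        have hk1lt : k + 1 < arr.length := by omega
        have hgdk : arr.getD (k + 1 - 1) 0 = num := by simpa [egk] using hk0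
        have hone : ((k + 1 : Nat) : Int) - 1 = (k : Int) := by omega
        constructor
        · intro acc si
          rw [hcons]
          simp only [List.foldl_cons]
          have hstep : pvStepA arr num (arr.length : Int) (acc, false, si) (k : Int)
              = (acc, true, (k : Int)) := by
            rw [pvStepA_eval]; simp [egk, hk0, hlast]
          rw [hstep, hk1c, ih2 acc (k : Int) (by omega) hk1lt hgdk, hone, hcons, hk1c]
        · intro acc si h1 h2 h3
          have h3' : arr[k - 1]?.getD 0 = num := by simpa using h3
          have egm : arr[k - 1]?.getD 0 = arr[k - 1] := by
            simp [List.getElem?_eq_getElem (show k - 1 < arr.length by omega)]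
          rw [egm] at h3'
          have hcons' : PySem.List.pyRange ((k : Int) - 1) (arr.length : Int) 1
              = ((k : Int) - 1) :: PySem.List.pyRange (k : Int) (arr.length : Int) 1 := by
            have := PySem.List.pyRange_one_cons (a := (k : Int) - 1)
              (b := (arr.length : Int)) (by omega)
            simpa [ekm] using this
          have hPkm : pvKeep arr num (arr.length : Int) ((k : Int) - 1) = false := by
            have e : ((k : Int) - 1) = ((k - 1 : Nat) : Int) := by omega
            have e' : k - 1 + 1 = k := by omega
            rw [e, pvKeep_eval]
            simp [egm, egk, e', h3', hk0]
            omega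
          rw [hcons']; rw [List.filter_cons, hPkm]; simp only [Bool.false_eq_true, if_false]; rw [hcons]
          simp only [List.foldl_cons]
          have egk1 : arr[k + 1]?.getD 0 = arr[k + 1] := by simp [List.getElem?_eq_getElem hk1lt]
          by_cases hk1v : arr[k + 1]?.getD 0 = num
          all_goals rw [egk1] at hk1v
          · -- the run continues past k
            have hstep : pvStepA arr num (arr.length : Int) (acc, true, si) (k : Int)
                = (acc, true, si) := by
              rw [pvStepA_eval]; simp [egk, egk1, hk0, hlast, hk1v]
            rw [hstep, hk1c, ih2 acc si (by omega) hk1lt hgdk, hone, hcons, hk1c]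
          · -- the run ends at k
            have hPk : pvKeep arr num (arr.length : Int) (k : Int) = true := by
              rw [pvKeep_eval]; simp [egk, egk1, hk0, hk1v]
            have hstep : pvStepA arr num (arr.length : Int) (acc, true, si) (k : Int)
                = (acc ++ [(k : Int)], false, si) := by
              rw [pvStepA_eval]; simp [egk, hk0, hlast, hk1lt, hk1v]
            rw [hstep, hk1c, ih1 (acc ++ [(k : Int)]) si, List.filter_cons, hPk]
            simp
    · -- arr[k] != num
      have hPk : pvKeep arr num (arr.length : Int) (k : Int) = false := by
        rw [pvKeep_eval]; simp [egk, hk0]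
      constructor
      · intro acc si
        rw [hcons]
        simp only [List.foldl_cons]
        have hstep : pvStepA arr num (arr.length : Int) (acc, false, si) (k : Int)
            = (acc, false, si) := by
          rw [pvStepA_eval]; simp [egk, hk0]
        rw [hstep, hk1c, ih1 acc si, List.filter_cons, hPk]
        simp
      · intro acc si h1 h2 h3
        have h3' : arr[k - 1]?.getD 0 = num := by simpa using h3
        have egm : arr[k - 1]?.getD 0 = arr[k - 1] := by
          simp [List.getElem?_eq_getElem (show k - 1 < arr.length by omega)]
        rw [egm] at h3'
        have hcons' : PySem.List.pyRange ((k : Int) - 1) (arr.length : Int) 1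
            = ((k : Int) - 1) :: PySem.List.pyRange (k : Int) (arr.length : Int) 1 := by
          have := PySem.List.pyRange_one_cons (a := (k : Int) - 1)
            (b := (arr.length : Int)) (by omega)
          simpa [ekm] using this
        have hPkm : pvKeep arr num (arr.length : Int) ((k : Int) - 1) = true := by
          have e : ((k : Int) - 1) = ((k - 1 : Nat) : Int) := by omega
          have e' : k - 1 + 1 = k := by omega
          rw [e, pvKeep_eval]
          simp [egm, egk, e', h3', hk0]
        rw [hcons']; rw [List.filter_cons, hPkm, if_pos rfl, hcons]
        simp only [List.foldl_cons]
        have hstep : pvStepA arr num (arr.length : Int) (acc, true, si) (k : Int)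
            = (acc ++ [(k : Int) - 1], false, si) := by
          rw [pvStepA_eval]; simp [egk, hk0]
        rw [hstep, hk1c, ih1 (acc ++ [(k : Int) - 1]) si, List.filter_cons, hPk]
        simp

-- ===== VERDICT (by name: the statement is the Claim_ definition above) =====
theorem find_last_indices_of_continuous_spec : Claim_equal_find_last_indices_of_continuous := by
  intro arr num _
  unfold Spec_find_last_indices_of_continuous find_last_indices_of_continuous find_last_indices_of_continuous_alt
  have h := (pv_fold_inv arr num arr.length 0 (by omega)).1 [] 0
  simpa using h
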